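-- pv_equiv track=rewrite | github.com/peleg11/MELD-classification-final-project | backend/logic.py | isFlac_positive
-- ===== SOURCE A (Python) =====
-- def isFlac_positive(actualValues, data, predictedValues):
--     flag_up = 0
--     flag_down = 0
--     count_up = 0
--     count_down = 0
--     for i in range(1, len(actualValues)):
--         if actualValues[i] > actualValues[i - 1] and flag_up == 0:
--             flag_down = 0
--             flag_up = 1
--             count_up += 1
--         elif actualValues[i] < actualValues[i - 1] and flag_down == 0:
--             flag_down = 1
--             flag_up = 0
--             count_down += 1
--
--     return count_down >= 4 and count_up >= 4, (count_up, count_down)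
-- ===== SOURCE B (Python) =====
-- def isFlac_positive(actualValues, data, predictedValues):
--     # per-step directions: +1 up, -1 down, 0 flat
--     signs = [(b > a) - (b < a) for a, b in zip(actualValues, actualValues[1:])]
--     # flat steps are not transitions; a run boundary is where the direction changes
--     runs = [s for s in signs if s != 0]
--     groups = [s for p, s in zip([0] + runs, runs) if s != p]
--     count_up = groups.count(1)
--     count_down = groups.count(-1)
--     return count_down >= 4 and count_up >= 4, (count_up, count_down)
-- ===== Notes on version B (the rewrite author's own statement) =====
-- stated objective: simpler
-- what changed: Replaces the stateful two-flag loop with a declarative pipeline: per-step sign list, filter out flat steps, count direction-group starts by zipping each sign with its predecessor.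
import Mathlib
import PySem

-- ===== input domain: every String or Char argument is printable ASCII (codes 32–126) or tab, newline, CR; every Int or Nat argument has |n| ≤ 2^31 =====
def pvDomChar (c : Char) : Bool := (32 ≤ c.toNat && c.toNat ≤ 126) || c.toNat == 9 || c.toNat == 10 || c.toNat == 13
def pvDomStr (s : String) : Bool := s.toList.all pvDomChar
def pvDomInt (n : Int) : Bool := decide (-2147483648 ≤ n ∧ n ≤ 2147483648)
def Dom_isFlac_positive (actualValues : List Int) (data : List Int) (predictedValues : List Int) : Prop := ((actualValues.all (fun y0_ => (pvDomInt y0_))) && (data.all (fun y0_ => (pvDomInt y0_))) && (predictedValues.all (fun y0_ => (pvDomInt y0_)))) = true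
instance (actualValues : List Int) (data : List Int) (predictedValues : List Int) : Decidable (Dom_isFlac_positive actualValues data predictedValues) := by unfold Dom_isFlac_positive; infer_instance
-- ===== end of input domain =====

-- B is a simpler, declarative re-decomposition: sign list -> filter flats -> count group starts (same O(n) cost).
-- B replaces the stateful two-flag loop with a declarative pipeline (sign list, filter flats, count group starts); same O(n) cost, objective: simpler.
-- ===== PORT A =====
def isFlac_positive (actualValues : List Int) (data : List Int) (predictedValues : List Int) : Bool × (Int × Int) :=
  let st := (PySem.List.pyRange 1 (actualValues.length : Int) 1).foldl
    (fun (s : Int × Int × Int × Int) i =>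
      if PySem.List.pyGetD actualValues i 0 > PySem.List.pyGetD actualValues (i - 1) 0 ∧ s.1 = 0 then
        (1, 0, s.2.2.1 + 1, s.2.2.2)
      else if PySem.List.pyGetD actualValues i 0 < PySem.List.pyGetD actualValues (i - 1) 0 ∧ s.2.1 = 0 then
        (0, 1, s.2.2.1, s.2.2.2 + 1)
      else s) ((0 : Int), (0 : Int), (0 : Int), (0 : Int))
  ((decide (st.2.2.2 ≥ 4) && decide (st.2.2.1 ≥ 4), (st.2.2.1, st.2.2.2)) : Bool × (Int × Int))

-- ===== PORT B =====
def isFlac_positive_alt (actualValues : List Int) (data : List Int) (predictedValues : List Int) : Bool × (Int × Int) :=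
  let signs := (actualValues.zip actualValues.tail).map
      (fun p => ((if p.2 > p.1 then 1 else 0) - (if p.2 < p.1 then 1 else 0) : Int))
  let runs := signs.filter (fun s => s ≠ 0)
  let groups := (((0 :: runs).zip runs).filter (fun q => q.2 ≠ q.1)).map (·.2)
  let count_up : Int := groups.count 1
  let count_down : Int := groups.count (-1)
  ((decide (count_down ≥ 4) && decide (count_up ≥ 4), (count_up, count_down)) : Bool × (Int × Int))

-- ===== PRECONDITION & SPEC =====
def Spec_isFlac_positive (actualValues : List Int) (data : List Int) (predictedValues : List Int) (out : Bool × (Int × Int)) : Prop := out = isFlac_positive_alt actualValues data predictedValues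
instance (actualValues : List Int) (data : List Int) (predictedValues : List Int) (out : Bool × (Int × Int)) : Decidable (Spec_isFlac_positive actualValues data predictedValues out) := by unfold Spec_isFlac_positive; infer_instance

-- ===== CLAIM (what is proved, stated in full; the proofs are below) =====
def Claim_equal_isFlac_positive : Prop := ∀ (actualValues : List Int) (data : List Int) (predictedValues : List Int), Dom_isFlac_positive actualValues data predictedValues → Spec_isFlac_positive actualValues data predictedValues (isFlac_positive actualValues data predictedValues)

-- ===== LEMMAS AND PROOFS =====

lemma pairmap (xs : List Int) : ∀ k : Nat,
    (PySem.List.pyRange ((k : Int) + 1) (xs.length : Int) 1).map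
      (fun i => (PySem.List.pyGetD xs (i - 1) 0, PySem.List.pyGetD xs i 0))
    = (xs.drop k).zip (xs.drop (k + 1)) := by
  intro k
  induction h : xs.length - (k+1) generalizing k with
  | zero =>
    rw [PySem.List.pyRange_one]
    rw [show (((xs.length : Int)) - ((k:Int)+1)).toNat = 0 by omega]
    rw [List.drop_eq_nil_of_le (by omega : xs.length ≤ k + 1)]
    simp
  | succ n ih =>
    have hlt : ((k : Int) + 1) < (xs.length : Int) := by omega
    rw [PySem.List.pyRange_one_cons hlt]
    have h1 : k < xs.length := by omega
    have h2 : k + 1 < xs.length := by omega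
    rw [List.drop_eq_getElem_cons h1, List.drop_eq_getElem_cons h2]
    simp only [List.map_cons, List.zip_cons_cons]
    have hih := ih (k+1) (by omega)
    rw [List.drop_eq_getElem_cons h2] at hih
    congr 1
    · have e1 : (k:Int) + 1 - 1 = ((k:Nat) : Int) := by ring
      rw [e1]
      rw [show ((k:Int) + 1) = (((k+1 : Nat)) : Int) by push_cast; ring]
      rw [PySem.List.pyGetD_natCast, PySem.List.pyGetD_natCast]
      simp [h1, h2]

def runsCnt : Int → List Int → Int × Int
  | _, [] => (0, 0)
  | l, s :: rest =>
    if s = 0 ∨ s = l then runsCnt l rest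
    else if s = 1 then ((runsCnt 1 rest).1 + 1, (runsCnt 1 rest).2)
    else ((runsCnt (-1) rest).1, (runsCnt (-1) rest).2 + 1)

lemma runsCnt_filter (signs : List Int) : ∀ l, runsCnt l (signs.filter (fun s => !decide (s = 0))) = runsCnt l signs := by
  induction signs with
  | nil => intro l; rfl
  | cons s rest ih =>
    intro l
    by_cases h0 : s = 0
    · simp [h0, runsCnt, ih]
    · simp only [List.filter_cons, h0, decide_false, Bool.not_false, if_pos]
      simp only [runsCnt, ih]

lemma groups_count (runs : List Int) (h : ∀ s ∈ runs, s = -1 ∨ s = 1) : ∀ l : Int,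
    (((((l :: runs).zip runs).filter (fun q => !decide (q.2 = q.1))).map (·.2)).count 1 : Int) = (runsCnt l runs).1 ∧
    (((((l :: runs).zip runs).filter (fun q => !decide (q.2 = q.1))).map (·.2)).count (-1) : Int) = (runsCnt l runs).2 := by
  induction runs with
  | nil => intro l; simp [runsCnt]
  | cons s rest ih =>
    intro l
    have hs := h s (by simp)
    have hrest : ∀ t ∈ rest, t = -1 ∨ t = 1 := fun t ht => h t (by simp [ht])
    have ihs := ih hrest s
    have hs0 : s ≠ 0 := by rcases hs with h1|h1 <;> simp [h1]
    simp only [List.zip_cons_cons, List.filter_cons]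
    by_cases hls : s = l
    · subst hls
      simp only [decide_true, Bool.not_true, if_neg, Bool.false_eq_true, not_false_eq_true]
      rw [show runsCnt s (s :: rest) = runsCnt s rest from by simp [runsCnt]]
      exact ihs
    · simp only [hls, decide_false, Bool.not_false, if_pos, List.map_cons]
      rw [show runsCnt l (s :: rest) = (if s = 1 then ((runsCnt 1 rest).1 + 1, (runsCnt 1 rest).2)
            else ((runsCnt (-1) rest).1, (runsCnt (-1) rest).2 + 1)) from by
        simp [runsCnt, hs0, hls]]
      rcases hs with h1 | h1 <;> subst h1
      · simp only [if_neg (by norm_num : ¬(-1 : Int) = 1)]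
        refine ⟨?_, ?_⟩
        · rw [List.count_cons_of_ne (by norm_num)]; exact ihs.1
        · rw [List.count_cons_self]; push_cast; rw [ihs.2]
      · simp only [reduceIte]
        refine ⟨?_, ?_⟩
        · rw [List.count_cons_self]; push_cast; rw [ihs.1]
        · rw [List.count_cons_of_ne (by norm_num)]; exact ihs.2

def lastDir : Int → List Int → Int
  | l, [] => l
  | l, s :: rest => lastDir (if s = 0 then l else s) rest

lemma foldA (signs : List Int) (h : ∀ s ∈ signs, s = -1 ∨ s = 0 ∨ s = 1) :
    ∀ (l cu cd : Int), l = -1 ∨ l = 0 ∨ l = 1 →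
    signs.foldl
      (fun (s : Int × Int × Int × Int) v =>
        if v = 1 ∧ s.1 = 0 then (1, 0, s.2.2.1 + 1, s.2.2.2)
        else if v = -1 ∧ s.2.1 = 0 then (0, 1, s.2.2.1, s.2.2.2 + 1)
        else s)
      ((if l = 1 then 1 else 0), (if l = -1 then 1 else 0), cu, cd)
    = ((if lastDir l signs = 1 then 1 else 0), (if lastDir l signs = -1 then 1 else 0),
       cu + (runsCnt l signs).1, cd + (runsCnt l signs).2) := by
  induction signs with
  | nil => intro l cu cd hl; simp [lastDir, runsCnt]
  | cons s rest ih =>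
    intro l cu cd hl
    have hrest : ∀ t ∈ rest, t = -1 ∨ t = 0 ∨ t = 1 := fun t ht => h t (by simp [ht])
    have hs := h s (by simp)
    simp only [List.foldl_cons]
    rcases hs with h1 | h1 | h1 <;> subst h1 <;> rcases hl with h2 | h2 | h2 <;> subst h2 <;>
      simp only [runsCnt, lastDir] <;> norm_num
    · have e := ih hrest (-1) cu cd (by norm_num); norm_num at e; exact e
    · have e := ih hrest (-1) cu (cd+1) (by norm_num); norm_num at e
      rw [show cd + ((runsCnt (-1) rest).2 + 1) = cd + 1 + (runsCnt (-1) rest).2 by ring]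
      exact e
    · have e := ih hrest (-1) cu (cd+1) (by norm_num); norm_num at e
      rw [show cd + ((runsCnt (-1) rest).2 + 1) = cd + 1 + (runsCnt (-1) rest).2 by ring]
      exact e
    · have e := ih hrest (-1) cu cd (by norm_num); norm_num at e; exact e
    · have e := ih hrest 0 cu cd (by norm_num); norm_num at e; exact e
    · have e := ih hrest 1 cu cd (by norm_num); norm_num at e; exact e
    · have e := ih hrest 1 (cu+1) cd (by norm_num); norm_num at e
      rw [show cu + ((runsCnt 1 rest).1 + 1) = cu + 1 + (runsCnt 1 rest).1 by ring]
      exact e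
    · have e := ih hrest 1 (cu+1) cd (by norm_num); norm_num at e
      rw [show cu + ((runsCnt 1 rest).1 + 1) = cu + 1 + (runsCnt 1 rest).1 by ring]
      exact e
    · have e := ih hrest 1 cu cd (by norm_num); norm_num at e; exact e


lemma pairmap0 (xs : List Int) :
    (PySem.List.pyRange 1 (xs.length : Int) 1).map
      (fun i => (PySem.List.pyGetD xs (i - 1) 0, PySem.List.pyGetD xs i 0))
    = xs.zip xs.tail := by
  have pm := pairmap xs 0
  norm_num at pm
  exact pm

def sgn (p : Int × Int) : Int := (if p.2 > p.1 then 1 else 0) - (if p.2 < p.1 then 1 else 0)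

lemma sgn_mem (p : Int × Int) : sgn p = -1 ∨ sgn p = 0 ∨ sgn p = 1 := by
  unfold sgn; split_ifs <;> omega

lemma step_eq (a b : Int) (s : Int × Int × Int × Int) :
    (if b > a ∧ s.1 = 0 then ((1:Int), (0:Int), s.2.2.1 + 1, s.2.2.2)
     else if b < a ∧ s.2.1 = 0 then (0, 1, s.2.2.1, s.2.2.2 + 1) else s)
    = (if sgn (a, b) = 1 ∧ s.1 = 0 then ((1:Int), (0:Int), s.2.2.1 + 1, s.2.2.2)
       else if sgn (a, b) = -1 ∧ s.2.1 = 0 then (0, 1, s.2.2.1, s.2.2.2 + 1) else s) := by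
  unfold sgn
  by_cases hgt : a < b
  · norm_num [hgt, show ¬ b < a by omega]
  · by_cases hlt : b < a
    · norm_num [hgt, hlt, show ¬ b > a from hgt]
    · norm_num [show ¬ b > a from hgt, hlt]

theorem ports_eq (actualValues : List Int) :
    (let st := (PySem.List.pyRange 1 (actualValues.length : Int) 1).foldl
      (fun (s : Int × Int × Int × Int) i =>
        if PySem.List.pyGetD actualValues i 0 > PySem.List.pyGetD actualValues (i - 1) 0 ∧ s.1 = 0 then
          (1, 0, s.2.2.1 + 1, s.2.2.2)
        else if PySem.List.pyGetD actualValues i 0 < PySem.List.pyGetD actualValues (i - 1) 0 ∧ s.2.1 = 0 then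
          (0, 1, s.2.2.1, s.2.2.2 + 1)
        else s) ((0 : Int), (0 : Int), (0 : Int), (0 : Int))
     ((decide (st.2.2.2 ≥ 4) && decide (st.2.2.1 ≥ 4), (st.2.2.1, st.2.2.2)) : Bool × (Int × Int)))
    =
    (let signs := (actualValues.zip actualValues.tail).map
        (fun p => ((if p.2 > p.1 then 1 else 0) - (if p.2 < p.1 then 1 else 0) : Int))
     let runs := signs.filter (fun s => s ≠ 0)
     let groups := (((0 :: runs).zip runs).filter (fun q => q.2 ≠ q.1)).map (·.2)
     let count_up : Int := groups.count 1
     let count_down : Int := groups.count (-1)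
     ((decide (count_down ≥ 4) && decide (count_up ≥ 4), (count_up, count_down)) : Bool × (Int × Int))) := by
  simp only []
  rw [show (fun (s : Int × Int × Int × Int) i =>
        if PySem.List.pyGetD actualValues i 0 > PySem.List.pyGetD actualValues (i - 1) 0 ∧ s.1 = 0 then
          ((1:Int), (0:Int), s.2.2.1 + 1, s.2.2.2)
        else if PySem.List.pyGetD actualValues i 0 < PySem.List.pyGetD actualValues (i - 1) 0 ∧ s.2.1 = 0 then
          (0, 1, s.2.2.1, s.2.2.2 + 1)
        else s)
      = (fun (s : Int × Int × Int × Int) i =>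
          (fun (s : Int × Int × Int × Int) (q : Int × Int) =>
            if sgn q = 1 ∧ s.1 = 0 then ((1:Int), (0:Int), s.2.2.1 + 1, s.2.2.2)
            else if sgn q = -1 ∧ s.2.1 = 0 then (0, 1, s.2.2.1, s.2.2.2 + 1)
            else s) s ((fun i => (PySem.List.pyGetD actualValues (i - 1) 0, PySem.List.pyGetD actualValues i 0)) i))
      from funext fun s => funext fun i =>
        step_eq (PySem.List.pyGetD actualValues (i - 1) 0) (PySem.List.pyGetD actualValues i 0) s]
  rw [← List.foldl_map
    (f := fun i => (PySem.List.pyGetD actualValues (i - 1) 0, PySem.List.pyGetD actualValues i 0))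
    (g := fun (s : Int × Int × Int × Int) (q : Int × Int) =>
      if sgn q = 1 ∧ s.1 = 0 then ((1:Int), (0:Int), s.2.2.1 + 1, s.2.2.2)
      else if sgn q = -1 ∧ s.2.1 = 0 then (0, 1, s.2.2.1, s.2.2.2 + 1)
      else s)]
  rw [pairmap0]
  rw [← List.foldl_map (f := fun q => sgn q)
    (g := fun (s : Int × Int × Int × Int) (v : Int) =>
      if v = 1 ∧ s.1 = 0 then ((1:Int), (0:Int), s.2.2.1 + 1, s.2.2.2)
      else if v = -1 ∧ s.2.1 = 0 then (0, 1, s.2.2.1, s.2.2.2 + 1)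
      else s)]
  have hmem : ∀ s ∈ (actualValues.zip actualValues.tail).map (fun q => sgn q), s = -1 ∨ s = 0 ∨ s = 1 := by
    intro s hsm
    obtain ⟨q, _, rfl⟩ := List.mem_map.mp hsm
    exact sgn_mem q
  have e := foldA ((actualValues.zip actualValues.tail).map (fun q => sgn q)) hmem 0 0 0 (by norm_num)
  norm_num at e
  rw [e]
  have hruns : ∀ s ∈ ((actualValues.zip actualValues.tail).map (fun q => sgn q)).filter (fun s => !decide (s = 0)), s = -1 ∨ s = 1 := by
    intro s hsm
    have h1 := List.mem_of_mem_filter hsm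
    have h2 := List.of_mem_filter hsm
    rcases hmem s h1 with h | h | h <;> simp [h] at h2 ⊢
  have g := groups_count _ hruns 0
  have rf := runsCnt_filter ((actualValues.zip actualValues.tail).map (fun q => sgn q)) 0
  simp only [ne_eq, decide_not, sgn] at g rf ⊢
  rw [g.1, g.2, rf]
  rfl

-- ===== VERDICT (by name: the statement is the Claim_ definition above) =====
theorem isFlac_positive_spec : Claim_equal_isFlac_positive := by
  intro actualValues data predictedValues _
  unfold Spec_isFlac_positive isFlac_positive isFlac_positive_alt
  exact ports_eq actualValues
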